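-- pv_equiv track=rewrite | github.com/graphsense/graphsense-blocksci | scripts/blocksci_export.py | chunk
-- ===== SOURCE A (Python) =====
-- def chunk(val_range, k):
--     '''Split the number range val_range=[n1, n2] into k evenly sized chunks
--
--     >>> chunk([0, 1], 1)
--     [(0, 1)]
--
--     >>> chunk([0, 4], 4)
--     [(0, 1), (1, 2), (2, 3), (3, 4)]
--
--     >>> chunk([0, 5], 4)
--     [(0, 2), (2, 3), (3, 4), (4, 5)]
--     '''
--
--     n1, n2 = val_range
--     assert n2 > n1
--     n = n2 - n1
--     assert 0 < k <= n
--     s, r = divmod(n, k)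
--     t = s + 1
--     return ([(n1+p, n1+p+t) for p in range(0, r*t, t)] +
--             [(n1+p, n1+p+s) for p in range(r*t, n, s)])
-- ===== SOURCE B (Python) =====
-- def chunk(val_range, k):
--     '''Split the number range val_range=[n1, n2] into k evenly sized chunks'''
--     n1, n2 = val_range
--     assert n2 > n1
--     n = n2 - n1
--     assert 0 < k <= n
--     s, r = divmod(n, k)
--
--     def bound(i):
--         # boundary of chunk i: the first r chunks have width s+1, the rest s
--         return n1 + i * s + min(i, r)
--
--     return [(bound(i), bound(i + 1)) for i in range(k)]
-- ===== Notes on version B (the rewrite author's own statement) =====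
-- stated objective: simpler
-- what changed: Replaces A's two-segment concatenation of step-t and step-s range comprehensions by a single pass over range(k) pairing adjacent values of one closed-form boundary function bound(i) = n1 + i*s + min(i, r).
import Mathlib
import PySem

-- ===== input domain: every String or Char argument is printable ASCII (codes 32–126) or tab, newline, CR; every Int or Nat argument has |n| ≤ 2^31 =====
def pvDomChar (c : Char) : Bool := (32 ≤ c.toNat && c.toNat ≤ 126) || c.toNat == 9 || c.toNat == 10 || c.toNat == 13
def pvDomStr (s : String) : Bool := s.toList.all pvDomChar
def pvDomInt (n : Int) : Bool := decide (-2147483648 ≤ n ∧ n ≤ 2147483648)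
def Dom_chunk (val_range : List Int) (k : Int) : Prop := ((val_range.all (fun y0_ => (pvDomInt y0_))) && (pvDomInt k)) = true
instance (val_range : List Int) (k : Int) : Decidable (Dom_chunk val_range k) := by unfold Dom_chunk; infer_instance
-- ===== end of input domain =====

-- B replaces A's two-segment concatenation of range comprehensions by one pass over range(k)
-- pairing adjacent values of a closed-form boundary function (objective: simpler).

-- ===== PORT A =====
def chunk (val_range : List Int) (k : Int) : List (Int × Int) :=
  match val_range with
  | [n1, n2] =>
    if n2 > n1 then
      let n := n2 - n1
      if 0 < k ∧ k ≤ n then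
        let s := PySem.Int.floordiv n k
        let r := PySem.Int.mod n k
        let t := s + 1
        ((PySem.List.pyRange 0 (r * t) t).map (fun p => (n1 + p, n1 + p + t))) ++
        ((PySem.List.pyRange (r * t) n s).map (fun p => (n1 + p, n1 + p + s)))
      else []  -- assert 0 < k <= n fails: AssertionError, excluded by Pre_
    else []    -- assert n2 > n1 fails: AssertionError, excluded by Pre_
  | _ => []    -- unpacking 'n1, n2 = val_range' raises: excluded by Pre_

-- ===== PORT B =====
def chunkBound (n1 s r i : Int) : Int := n1 + i * s + min i r

def chunk_alt (val_range : List Int) (k : Int) : List (Int × Int) :=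
  -- 'n1, n2 = val_range': succeeds exactly when the list has two elements
  if val_range.length = 2 then
    let n1 := val_range.getD 0 0
    let n2 := val_range.getD 1 0
    if n2 > n1 then
      let n := n2 - n1
      if 0 < k ∧ k ≤ n then
        let s := PySem.Int.floordiv n k
        let r := PySem.Int.mod n k
        (PySem.List.pyRange 0 k 1).map
          (fun i => (chunkBound n1 s r i, chunkBound n1 s r (i + 1)))
      else []
    else []
  else []

-- ===== PRECONDITION & SPEC =====
-- Pre_ excludes exactly the inputs where A raises: a val_range not of length 2
-- (ValueError on unpacking) and failure of either assert (AssertionError).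
def Pre_chunk (val_range : List Int) (k : Int) : Prop :=
  val_range.length = 2 ∧ val_range.getD 0 0 < val_range.getD 1 0 ∧
    0 < k ∧ k ≤ val_range.getD 1 0 - val_range.getD 0 0
instance (val_range : List Int) (k : Int) : Decidable (Pre_chunk val_range k) := by
  unfold Pre_chunk; infer_instance

def pvWitness_chunk : List Int × Int := ([0, 5], 4)

def Spec_chunk (val_range : List Int) (k : Int) (out : List (Int × Int)) : Prop := out = chunk_alt val_range k
instance (val_range : List Int) (k : Int) (out : List (Int × Int)) : Decidable (Spec_chunk val_range k out) := by unfold Spec_chunk; infer_instance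

-- ===== CLAIM (what is proved, stated in full; the proofs are below) =====
def Claim_equal_chunk : Prop := ∀ (val_range : List Int) (k : Int), Dom_chunk val_range k → Pre_chunk val_range k → Spec_chunk val_range k (chunk val_range k)

-- ===== LEMMAS AND PROOFS =====

-- count of a step-t range [0, r*t): exactly r elements
lemma count_first (r t : Int) (ht : 0 < t) (hr : 0 ≤ r) :
    (if (0:Int) < r * t then ((r * t - 0 + t - 1) / t).toNat else 0) = r.toNat := by
  rcases lt_or_ge 0 r with h | h
  · rw [if_pos (by positivity)]
    have : r * t - 0 + t - 1 = (t - 1) + r * t := by ring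
    rw [this, Int.add_mul_ediv_right _ _ (by omega : t ≠ 0),
        Int.ediv_eq_zero_of_lt (by omega) (by omega)]
    omega
  · have hr0 : r = 0 := le_antisymm h hr
    simp [hr0]

-- count of a step-s range [r*t, n) with n - r*t = (k-r)*s: exactly k - r elements
lemma count_second (a m s : Int) (hs : 0 < s) (hm : 0 < m) :
    (if a < a + m * s then ((a + m * s - a + s - 1) / s).toNat else 0) = m.toNat := by
  rw [if_pos (by nlinarith)]
  have : a + m * s - a + s - 1 = (s - 1) + m * s := by ring
  rw [this, Int.add_mul_ediv_right _ _ (by omega : s ≠ 0),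
      Int.ediv_eq_zero_of_lt (by omega) (by omega)]
  omega

theorem chunk_eq_alt (val_range : List Int) (k : Int)
    (hp : Pre_chunk val_range k) : chunk val_range k = chunk_alt val_range k := by
  obtain ⟨hlen, hlt, hk0, hkn⟩ := hp
  match val_range, hlen with
  | [n1, n2], _ =>
    have hlt2 : n1 < n2 := by simpa using hlt
    have hkn2 : k ≤ n2 - n1 := by simpa using hkn
    simp only [chunk, chunk_alt, List.length_cons, List.length_nil, List.getD, List.getElem?_cons_zero, List.getElem?_cons_succ, Option.getD_some, if_pos hlt2, if_pos (⟨hk0, hkn2⟩ : 0 < k ∧ k ≤ n2 - n1)]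
    set n := n2 - n1 with hn
    set s := PySem.Int.floordiv n k with hsdef
    set r := PySem.Int.mod n k with hrdef
    have hs : 0 < s := by
      rw [hsdef, PySem.Int.floordiv_eq_ediv_of_pos hk0]
      have : (1 : Int) ≤ n / k := Int.le_ediv_iff_mul_le hk0 |>.mpr (by omega)
      omega
    have hr0 : 0 ≤ r := PySem.Int.mod_nonneg n hk0
    have hrk : r < k := PySem.Int.mod_lt n hk0
    have hnsk : s * k + r = n := PySem.Int.floordiv_mul_add_mod n k
    -- expand the three pyRanges into List.range maps
    rw [PySem.List.pyRange_of_pos 0 (r * (s + 1)) (by omega),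
        PySem.List.pyRange_of_pos (r * (s + 1)) n (by omega),
        PySem.List.pyRange_one]
    rw [count_first r (s + 1) (by omega) hr0]
    have hnsplit : n = r * (s + 1) + (k - r) * s := by ring_nf; omega
    rw [hnsplit, count_second (r * (s + 1)) (k - r) s hs (by omega)]
    have hktoNat : (k - 0).toNat = r.toNat + (k - r).toNat := by omega
    rw [hktoNat, List.range_add]
    simp only [List.map_append, List.map_map]
    refine congrArg₂ (· ++ ·) ?_ ?_
    · apply List.map_congr_left
      intro j hj
      rw [List.mem_range] at hj
      have hjr : (j : Int) < r := by omega
      simp only [Function.comp, chunkBound]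
      rw [min_eq_left (by omega : (0 : Int) + (j : Int) ≤ r),
          min_eq_left (by omega : (0 : Int) + (j : Int) + 1 ≤ r)]
      simp only [Prod.mk.injEq]
      exact ⟨by ring, by ring⟩
    · apply List.map_congr_left
      intro j hj
      rw [List.mem_range] at hj
      simp only [Function.comp, chunkBound]
      have hcast : ((r.toNat + j : Nat) : Int) = r + j := by omega
      rw [hcast]
      rw [min_eq_right (by omega : r ≤ (0 : Int) + (r + (j : Int))),
          min_eq_right (by omega : r ≤ (0 : Int) + (r + (j : Int)) + 1)]
      simp only [Prod.mk.injEq]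
      exact ⟨by ring, by ring⟩

-- ===== VERDICT (by name: the statement is the Claim_ definition above) =====
theorem chunk_spec : Claim_equal_chunk := by
  intro val_range k _ hp
  exact chunk_eq_alt val_range k hp
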